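-- pv_equiv track=rewrite | github.com/JessNah/Qbasic | Utility.py | validTxnList
-- ===== SOURCE A (Python) =====
-- def validTxnList(txn_message_list):
--     """Function to check if the list of transactionsummary messages is of valid format.
--     Returns False if incorrect format
--     """
--
--     for string in txn_message_list:
--         # check max 61 characters
--         count = 0
--         for char in string:
--             count = count + 1
--             if(count > 61):
--                 return False
--         # test first 3 characters is a valid txn code
--         txnCode = string[:3]
--         if(txnCode != "DEP" and txnCode != "WDR" and txnCode != "XFR" and txnCode != "NEW" and txnCode != "DEL" and txnCode != "EOS"):
--             return False
--         #test that all the individual elements are seperated by exactly one space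
--         count = 0
--         for char in string:
--             if(char == " "):
--                 count = count + 1
--                 if(count > 4):
--                     return False
--         #test 7 digit account number TO
--         substring = string[4:]
--         #check first character is no zero
--         firstChar = substring[0:0]
--         if(firstChar == "0"):
--             return False
--         count = 0
--         for char in substring:
--             if(char != " "):
--                 count+=1
--             else:
--                 break
--             if(count > 7):
--                 return False
--         #test 7 digit account number FROM
--         #find index for from account number
--         spaceCount = 0
--         count = 0
--         for char in string:
--             count += 1
--             if(char == " "):
--                 spaceCount += 1
--                 if(spaceCount >= 3):
--                     break
--         substring = string[count:]
--         #check first character is no zero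
--         firstChar = substring[0:0]
--         if(firstChar == "0"):
--             return False
--         count = 0
--         for char in substring:
--             if(char != " "):
--                 count+=1
--             else:
--                 break
--             if(count > 7):
--                 return False
--
--         #check monetary amount is between 3 8 decimmal digits
--         spaceCount = 0
--         count = 0
--         for char in string:
--             count += 1
--             if(char == " "):
--                 spaceCount += 1
--                 if(spaceCount >= 2):
--                     break
--         substring = string[count:]
--         count = 0
--         for char in substring:
--             if(char != " "):
--                 count+=1
--             else:
--                 break
--
--         if(count < 3 or count > 8):
--             return False
--
--         #test that the new account name is between 3 - 30 characters
--         txnCode = string[:3]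
--         if(txnCode == "NEW"):
--             wordList = string.split()
--             if(len(wordList[-1]) < 3 or len(wordList[-1]) > 30):
--                 return False
--
--         #test that only alphanumeric and space characters'
--         #if(re.match('^[\w\s\w\s\w\s\w\s[\w\*]*]+',string) is not None):
--         #    return False
--
--         #test that there is no beginning or ending trailing space
--         if string.startswith(" ") or string.endswith(" "):
--             return False
--
--     return True
-- ===== SOURCE B (Python) =====
-- def validTxnList(txn_message_list):
--     """Check every transaction-summary message; single pass collects the space
--     positions, fields are then derived by index lookups instead of rescans."""
--     return all(_pv_valid(s) for s in txn_message_list)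
--
--
-- _PV_CODES = {"DEP", "WDR", "XFR", "NEW", "DEL", "EOS"}
--
--
-- def _pv_valid(s):
--     n = len(s)
--     if n > 61:
--         return False
--     if s[:3] not in _PV_CODES:
--         return False
--     spaces = [i for i, c in enumerate(s) if c == " "]
--     if len(spaces) > 4:
--         return False
--
--     def run_len(start):
--         stop = next((i for i in spaces if i >= start), n)
--         return max(0, stop - start)
--
--     if run_len(4) > 7:                       # account number TO (after code + space)
--         return False
--     start3 = spaces[2] + 1 if len(spaces) >= 3 else n
--     if run_len(start3) > 7:                  # account number FROM (after 3rd space)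
--         return False
--     start2 = spaces[1] + 1 if len(spaces) >= 2 else n
--     amt = run_len(start2)                    # monetary amount (after 2nd space)
--     if amt < 3 or amt > 8:
--         return False
--     if s[:3] == "NEW":
--         wl = s.split()
--         if len(wl[-1]) < 3 or len(wl[-1]) > 30:
--             return False
--     return not (s.startswith(" ") or s.endswith(" "))
-- ===== Notes on version B (the rewrite author's own statement) =====
-- stated objective: alternative
-- what changed: B collects the space positions of each message once and derives every field (post-code run, post-2nd-space amount, post-3rd-space account) by index lookup into that list, replacing A's repeated from-the-start rescans and per-character counting loops; the dead firstChar=='0' comparison on an empty slice is dropped.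
import Mathlib
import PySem

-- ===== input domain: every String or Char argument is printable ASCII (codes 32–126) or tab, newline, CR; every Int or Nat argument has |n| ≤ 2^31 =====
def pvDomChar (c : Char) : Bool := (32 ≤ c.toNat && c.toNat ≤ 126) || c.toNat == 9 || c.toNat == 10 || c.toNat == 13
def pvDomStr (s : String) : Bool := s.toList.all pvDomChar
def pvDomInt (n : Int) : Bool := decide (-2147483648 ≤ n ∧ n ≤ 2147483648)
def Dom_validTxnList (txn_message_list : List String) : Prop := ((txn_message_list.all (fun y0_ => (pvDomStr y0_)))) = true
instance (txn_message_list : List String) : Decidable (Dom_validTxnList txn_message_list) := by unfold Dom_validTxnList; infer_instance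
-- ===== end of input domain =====

-- B replaces A's repeated from-the-start rescans by one collected list of space positions plus index lookups (alternative decomposition, same cost class).


-- ===== PORT A =====
-- A's first loop: count the characters, early exit as soon as count > 61
def pvLenExceeds : List Char → Nat → Bool
  | [], _ => false
  | _ :: r, count => if count + 1 > 61 then true else pvLenExceeds r (count + 1)

-- A's space-counting loop: early exit as soon as more than 4 spaces were seen
def pvSpaceExceeds : List Char → Nat → Bool
  | [], _ => false
  | c :: r, count =>
      if c = ' ' then
        (if count + 1 > 4 then true else pvSpaceExceeds r (count + 1))
      else pvSpaceExceeds r count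

-- A's account-number loop: count non-space run, break on space, early exit when count > 7
def pvRunExceeds7 : List Char → Nat → Bool
  | [], _ => false
  | c :: r, count =>
      if c ≠ ' ' then
        (if count + 1 > 7 then true else pvRunExceeds7 r (count + 1))
      else false

-- A's index scan: count characters, stop after the k-th space (returns final `count`)
def pvScanIdx : List Char → Nat → Nat → Nat → Nat
  | [], _, _, count => count
  | c :: r, k, spaceCount, count =>
      if c = ' ' then
        (if spaceCount + 1 ≥ k then count + 1 else pvScanIdx r k (spaceCount + 1) (count + 1))
      else pvScanIdx r k spaceCount (count + 1)

-- A's amount loop: count the non-space run, break on space (no early exit)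
def pvRunCount : List Char → Nat → Nat
  | [], count => count
  | c :: r, count => if c ≠ ' ' then pvRunCount r (count + 1) else count

-- the body of A's `for string in txn_message_list` loop (early `return False`s become nested ifs)
def pvValidOne (s : String) : Bool :=
  let string := s.toList
  if pvLenExceeds string 0 then false
  else
    let txnCode := PySem.List.slice string none (some 3)
    if txnCode != "DEP".toList && txnCode != "WDR".toList && txnCode != "XFR".toList
        && txnCode != "NEW".toList && txnCode != "DEL".toList && txnCode != "EOS".toList then false
    else if pvSpaceExceeds string 0 then false
    else
      let substring := PySem.List.slice string (some 4) none
      -- substring[0:0] == "0" : kept literally (always-empty slice, never equal)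
      if PySem.List.slice substring (some 0) (some 0) == "0".toList then false
      else if pvRunExceeds7 substring 0 then false
      else
        let count3 := pvScanIdx string 3 0 0
        let substring3 := PySem.List.slice string (some (count3 : Int)) none
        if PySem.List.slice substring3 (some 0) (some 0) == "0".toList then false
        else if pvRunExceeds7 substring3 0 then false
        else
          let count2 := pvScanIdx string 2 0 0
          let substring2 := PySem.List.slice string (some (count2 : Int)) none
          let amt := pvRunCount substring2 0
          if amt < 3 ∨ 8 < amt then false
          else
            let txnCode2 := PySem.List.slice string none (some 3)
            -- wordList[-1]: pyGetD with default [] — only evaluated when string[:3] = "NEW",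
            -- where split() is provably nonempty, so Python never raises here
            if txnCode2 == "NEW".toList &&
                (let wordList := PySem.Chars.split₀ string
                 let lastLen := (PySem.List.pyGetD wordList (-1) []).length
                 decide (lastLen < 3) || decide (30 < lastLen)) then false
            else !(PySem.Chars.startswith string [' '] || PySem.Chars.endswith string [' '])

def validTxnList : List String → Bool
  | [] => true
  | s :: rest => if pvValidOne s then validTxnList rest else false

-- ===== PORT B =====
def pvCodes : List (List Char) := ["DEP", "WDR", "XFR", "NEW", "DEL", "EOS"].map String.toList

-- Source B: spaces = [i for i, c in enumerate(s) if c == " "]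
def pvSpacesIdx (cs : List Char) : List Nat :=
  ((cs.zipIdx).filter (fun p => p.1 == ' ')).map (·.2)

-- Source B: next((i for i in spaces if i >= start), n)
def pvNextGE (sp : List Nat) (start dflt : Nat) : Nat :=
  match sp with
  | [] => dflt
  | i :: r => if start ≤ i then i else pvNextGE r start dflt

-- Source B: _pv_valid (run_len start = max(0, nextGE - start); Nat subtraction is that max)
def pvValidOneB (s : String) : Bool :=
  let cs := s.toList
  let n := cs.length
  if n > 61 then false
  else if !(pvCodes.contains (cs.take 3)) then false
  else
    let sp := pvSpacesIdx cs
    if sp.length > 4 then false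
    else if pvNextGE sp 4 n - 4 > 7 then false
    else
      let start3 := if sp.length ≥ 3 then sp.getD 2 0 + 1 else n
      if pvNextGE sp start3 n - start3 > 7 then false
      else
        let start2 := if sp.length ≥ 2 then sp.getD 1 0 + 1 else n
        let amt := pvNextGE sp start2 n - start2
        if amt < 3 ∨ 8 < amt then false
        else if cs.take 3 == "NEW".toList &&
            (let lastLen := (PySem.List.pyGetD (PySem.Chars.split₀ cs) (-1) []).length
             decide (lastLen < 3) || decide (30 < lastLen)) then false
        else !(PySem.Chars.startswith cs [' '] || PySem.Chars.endswith cs [' '])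

def validTxnList_alt (txn_message_list : List String) : Bool :=
  txn_message_list.all pvValidOneB

-- ===== PRECONDITION & SPEC =====
def Spec_validTxnList (txn_message_list : List String) (out : Bool) : Prop := out = validTxnList_alt txn_message_list
instance (txn_message_list : List String) (out : Bool) : Decidable (Spec_validTxnList txn_message_list out) := by unfold Spec_validTxnList; infer_instance

-- ===== CLAIM (what is proved, stated in full; the proofs are below) =====
def Claim_equal_validTxnList : Prop := ∀ (txn_message_list : List String), Dom_validTxnList txn_message_list → Spec_validTxnList txn_message_list (validTxnList txn_message_list)

-- ===== LEMMAS AND PROOFS =====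

-- proof-side clean versions of the loops
def pvRunLen : List Char → Nat
  | [] => 0
  | c :: r => if c = ' ' then 0 else pvRunLen r + 1

def pvScan : List Char → Nat → Nat
  | [], _ => 0
  | c :: r, k => if c = ' ' then (if k ≤ 1 then 1 else 1 + pvScan r (k - 1)) else 1 + pvScan r k

def pvSpacesNat : List Char → List Nat
  | [] => []
  | c :: r => if c = ' ' then 0 :: (pvSpacesNat r).map (· + 1) else (pvSpacesNat r).map (· + 1)

theorem pvLenExceeds_eq (cs : List Char) : ∀ k, k ≤ 61 →
    pvLenExceeds cs k = decide (k + cs.length > 61) := by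
  induction cs with
  | nil => intro k hk; simp [pvLenExceeds]; omega
  | cons c r ih =>
    intro k hk
    simp only [pvLenExceeds, List.length_cons]
    by_cases h : k + 1 > 61
    · have h2 : k + (r.length + 1) > 61 := by omega
      simp [h, h2]
    · rw [if_neg h, ih (k + 1) (by omega)]
      simp only [decide_eq_decide]; omega

theorem pvSpaceExceeds_eq (cs : List Char) : ∀ k, k ≤ 4 →
    pvSpaceExceeds cs k = decide (k + cs.count ' ' > 4) := by
  induction cs with
  | nil => intro k hk; simp [pvSpaceExceeds]; omega
  | cons c r ih =>
    intro k hk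
    simp only [pvSpaceExceeds, List.count_cons]
    by_cases hc : c = ' '
    · subst hc
      rw [if_pos rfl]
      by_cases h : k + 1 > 4
      · have h2 : k + (r.count ' ' + 1) > 4 := by simp; omega
        simp [h, h2]
      · rw [if_neg h, ih (k + 1) (by omega)]
        simp only [decide_eq_decide]; simp; omega
    · rw [if_neg hc, ih k hk]
      simp [hc]

theorem pvRunExceeds7_eq (cs : List Char) : ∀ k, k ≤ 7 →
    pvRunExceeds7 cs k = decide (k + pvRunLen cs > 7) := by
  induction cs with
  | nil => intro k hk; simp [pvRunExceeds7, pvRunLen]; omega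
  | cons c r ih =>
    intro k hk
    by_cases hc : c = ' '
    · subst hc; simp [pvRunExceeds7, pvRunLen]; omega
    · by_cases h : k + 1 > 7
      · simp [pvRunExceeds7, pvRunLen, hc, h]; omega
      · simp only [pvRunExceeds7, pvRunLen, if_pos hc, if_neg hc, if_neg h,
          ih (k + 1) (by omega), decide_eq_decide]
        omega

theorem pvRunCount_eq (cs : List Char) : ∀ k, pvRunCount cs k = k + pvRunLen cs := by
  induction cs with
  | nil => intro k; simp [pvRunCount, pvRunLen]
  | cons c r ih =>
    intro k
    simp only [pvRunCount, pvRunLen]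
    by_cases hc : c = ' '
    · simp [hc]
    · rw [if_pos hc, if_neg hc, ih (k + 1)]; omega

theorem pvSpacesIdx_aux (cs : List Char) : ∀ k,
    ((cs.zipIdx k).filter (fun p => p.1 == ' ')).map (·.2) = (pvSpacesNat cs).map (· + k) := by
  induction cs with
  | nil => intro k; simp [pvSpacesNat]
  | cons c r ih =>
    intro k
    by_cases hc : c = ' '
    · subst hc
      simp only [List.zipIdx_cons, List.filter_cons, beq_self_eq_true, if_pos, List.map_cons,
        pvSpacesNat, ih (k + 1), List.map_map]
      refine congrArg₂ List.cons (by omega) ?_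
      exact List.map_congr_left fun a _ => by change a + (k + 1) = a + 1 + k; omega
    · have hb : ((c == ' ') : Bool) = false := by simpa using hc
      simp only [List.zipIdx_cons, List.filter_cons, hb, pvSpacesNat, if_neg hc, ih (k + 1),
        List.map_map, Bool.false_eq_true, if_false]
      exact List.map_congr_left fun a _ => by change a + (k + 1) = a + 1 + k; omega

theorem pvSpacesIdx_eq (cs : List Char) : pvSpacesIdx cs = pvSpacesNat cs := by
  have := pvSpacesIdx_aux cs 0
  simpa [pvSpacesIdx] using this

theorem pvSpacesNat_length (cs : List Char) : (pvSpacesNat cs).length = cs.count ' ' := by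
  induction cs with
  | nil => simp [pvSpacesNat]
  | cons c r ih =>
    by_cases hc : c = ' '
    · subst hc; simp [pvSpacesNat, ih]
    · simp [pvSpacesNat, hc, ih]

theorem pvNextGE_map_succ (l : List Nat) (s d : Nat) :
    pvNextGE (l.map (· + 1)) (s + 1) (d + 1) = pvNextGE l s d + 1 := by
  induction l with
  | nil => rfl
  | cons i r ih =>
    by_cases h : s ≤ i
    · simp [pvNextGE, h, Nat.succ_le_succ h]
    · have h2 : ¬ s + 1 ≤ i + 1 := by omega
      simp [pvNextGE, h, h2, ih]

theorem pvNextGE_map_zero (l : List Nat) (d : Nat) :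
    pvNextGE (l.map (· + 1)) 0 (d + 1) = pvNextGE l 0 d + 1 := by
  cases l with
  | nil => rfl
  | cons i r => simp [pvNextGE]

theorem pvNextGE_spaces (cs : List Char) : ∀ start,
    pvNextGE (pvSpacesNat cs) start cs.length = min start cs.length + pvRunLen (cs.drop start) := by
  induction cs with
  | nil => intro start; simp [pvSpacesNat, pvNextGE, pvRunLen]
  | cons c r ih =>
    intro start
    cases start with
    | zero =>
      by_cases hc : c = ' '
      · subst hc; simp [pvSpacesNat, pvNextGE, pvRunLen]
      · simp only [pvSpacesNat, if_neg hc, List.length_cons, List.drop_zero]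
        rw [pvNextGE_map_zero, ih 0]
        simp [pvRunLen, hc]
    | succ s =>
      have hstep : pvNextGE ((pvSpacesNat r).map (· + 1)) (s + 1) (r.length + 1)
          = min s r.length + pvRunLen (r.drop s) + 1 := by
        rw [pvNextGE_map_succ, ih s]
      by_cases hc : c = ' '
      · subst hc
        simp only [pvSpacesNat, reduceIte, List.length_cons, List.drop_succ_cons]
        simp only [pvNextGE]
        rw [if_neg (by omega), hstep]
        omega
      · simp only [pvSpacesNat, if_neg hc, List.length_cons, List.drop_succ_cons]
        rw [hstep]
        omega

theorem pvNextGE_sub (cs : List Char) (start : Nat) :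
    pvNextGE (pvSpacesNat cs) start cs.length - start = pvRunLen (cs.drop start) := by
  rw [pvNextGE_spaces]
  by_cases h : start ≤ cs.length
  · rw [Nat.min_eq_left h]; omega
  · rw [List.drop_eq_nil_of_le (by omega)]
    simp [pvRunLen]

theorem pvScanIdx_eq (cs : List Char) : ∀ k sc cnt, sc < k →
    pvScanIdx cs k sc cnt = cnt + pvScan cs (k - sc) := by
  induction cs with
  | nil => intro k sc cnt _; simp [pvScanIdx, pvScan]
  | cons c r ih =>
    intro k sc cnt h
    by_cases hc : c = ' '
    · subst hc
      by_cases hb : sc + 1 ≥ k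
      · have h1 : k - sc ≤ 1 := by omega
        simp [pvScanIdx, pvScan, hb, h1]
      · have h1 : ¬ (k - sc ≤ 1) := by omega
        simp only [pvScanIdx, pvScan, reduceIte, if_neg hb, if_neg h1,
          ih k (sc + 1) (cnt + 1) (by omega)]
        have h2 : k - sc - 1 = k - (sc + 1) := by omega
        rw [h2]; omega
    · simp only [pvScanIdx, pvScan, if_neg hc, ih k sc (cnt + 1) h]
      omega

theorem pvScan_eq (cs : List Char) : ∀ k, 1 ≤ k →
    pvScan cs k = match (pvSpacesNat cs)[k - 1]? with
      | some i => i + 1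
      | none => cs.length := by
  induction cs with
  | nil => intro k hk; simp [pvScan, pvSpacesNat]
  | cons c r ih =>
    intro k hk
    by_cases hc : c = ' '
    · subst hc
      by_cases h1 : k ≤ 1
      · have hk1 : k = 1 := by omega
        subst hk1
        simp [pvScan, pvSpacesNat]
      · have hk2 : k - 1 = (k - 2) + 1 := by omega
        simp only [pvScan, pvSpacesNat, reduceIte, if_neg h1]
        rw [ih (k - 1) (by omega), hk2]
        simp only [List.getElem?_cons_succ, List.getElem?_map, Nat.add_sub_cancel,
          List.length_cons]
        cases (pvSpacesNat r)[k - 2]? with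
        | none => simp [Nat.add_comm]
        | some i => simp [Nat.add_comm]
    · have hk2 : pvScan (c :: r) k = 1 + pvScan r k := by simp [pvScan, hc]
      rw [hk2, ih k hk]
      simp only [pvSpacesNat, if_neg hc, List.getElem?_map, List.length_cons]
      cases (pvSpacesNat r)[k - 1]? with
      | none => simp [Nat.add_comm]
      | some i => simp [Nat.add_comm]

theorem pvStart_eq (sp : List Nat) (n j : Nat) :
    (match sp[j]? with | some i => i + 1 | none => n)
      = if sp.length ≥ j + 1 then sp.getD j 0 + 1 else n := by
  by_cases h : j < sp.length
  · rw [List.getElem?_eq_getElem h, if_pos (by omega)]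
    simp [List.getD_eq_getElem?_getD, List.getElem?_eq_getElem h]
  · rw [List.getElem?_eq_none (by omega), if_neg (by omega)]

theorem pvCodes_cond (x : List Char) :
    (x != "DEP".toList && x != "WDR".toList && x != "XFR".toList && x != "NEW".toList
      && x != "DEL".toList && x != "EOS".toList) = !(pvCodes.contains x) := by
  simp [pvCodes, Bool.not_or, Bool.and_assoc, bne, Bool.beq_eq_decide_eq]

theorem pvValidOne_eq (s : String) : pvValidOne s = pvValidOneB s := by
  have hsl : PySem.List.slice s.toList none (some 3) = s.toList.take 3 := by
    simp [pysem]
  have hs4 : PySem.List.slice s.toList (some 4) none = s.toList.drop 4 := by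
    simp [pysem]
  have hz : ∀ x : List Char, (PySem.List.slice x (some 0) (some 0) == ("0".toList : List Char)) = false := by
    intro x; simp [pysem]
  have hlen := pvLenExceeds_eq s.toList 0 (by omega)
  have hsp := pvSpaceExceeds_eq s.toList 0 (by omega)
  have hr : ∀ x : List Char, pvRunExceeds7 x 0 = decide (0 + pvRunLen x > 7) :=
    fun x => pvRunExceeds7_eq x 0 (by omega)
  have hscan3 : pvScanIdx s.toList 3 0 0
      = (if (pvSpacesNat s.toList).length ≥ 3 then (pvSpacesNat s.toList).getD 2 0 + 1
         else s.toList.length) := by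
    rw [pvScanIdx_eq _ 3 0 0 (by omega), pvScan_eq _ 3 (by omega)]
    simpa using pvStart_eq (pvSpacesNat s.toList) s.toList.length 2
  have hscan2 : pvScanIdx s.toList 2 0 0
      = (if (pvSpacesNat s.toList).length ≥ 2 then (pvSpacesNat s.toList).getD 1 0 + 1
         else s.toList.length) := by
    rw [pvScanIdx_eq _ 2 0 0 (by omega), pvScan_eq _ 2 (by omega)]
    simpa using pvStart_eq (pvSpacesNat s.toList) s.toList.length 1
  unfold pvValidOne pvValidOneB
  simp only [hsl, hs4, hz, hlen, hsp, hr, pvRunCount_eq, pvSpacesIdx_eq, pvNextGE_sub,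
    hscan3, hscan2, pvCodes_cond, pvSpacesNat_length, PySem.List.slice_from_natCast,
    Nat.zero_add, decide_eq_true_eq, Bool.false_eq_true, if_false]

theorem validTxnList_eq_all (l : List String) : validTxnList l = l.all pvValidOne := by
  induction l with
  | nil => rfl
  | cons s r ih => simp only [validTxnList, ih, List.all_cons]; cases pvValidOne s <;> simp

-- ===== VERDICT (by name: the statement is the Claim_ definition above) =====
theorem validTxnList_spec : Claim_equal_validTxnList := by
  intro l _
  unfold Spec_validTxnList validTxnList_alt
  rw [validTxnList_eq_all, funext pvValidOne_eq]
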